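-- pv_equiv track=rewrite | github.com/Context-Aware-Character-TTS-System/langchain_practice | main1.py | _speaker_samples
-- ===== SOURCE A (Python) =====
-- from collections import Counter, defaultdict
--
-- def _top_speakers(items, top_n=8):
--     cnt = Counter([it["speaker_id"] for it in items])
--     return [spk for spk, _ in cnt.most_common(top_n)]
--
-- def _speaker_samples(items, top_n=8, max_lines_per_speaker=40):
--     tops = set(_top_speakers(items, top_n=top_n))
--     by_spk = {}
--     for it in items:
--         spk = it["speaker_id"]
--         if spk not in tops:
--             continue
--         by_spk.setdefault(spk, [])
--         if len(by_spk[spk]) < max_lines_per_speaker: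
--             by_spk[spk].append(it["utterance"])
--     return {spk: "\n".join(lines) for spk, lines in by_spk.items()}
-- ===== SOURCE B (Python) =====
-- def _speaker_samples(items, top_n=8, max_lines_per_speaker=40):
--     groups = {}
--     for it in items:
--         groups.setdefault(it["speaker_id"], []).append(it["utterance"])
--     top = set(sorted(groups, key=lambda s: -len(groups[s]))[:max(top_n, 0)])
--     return {s: "\n".join(lines[:max(max_lines_per_speaker, 0)])
--             for s, lines in groups.items() if s in top}
-- ===== Notes on version B (the rewrite author's own statement) =====
-- stated objective: alternative
-- what changed: B replaces A's Counter pass plus a second filtered, capped collection pass by one uncapped grouping pass (speaker -> all utterances), ranks speakers by group length with a single stable sort that mirrors most_common's tie-break, and applies the per-speaker line cap only when emitting the output.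
-- outside the precondition, e.g. on _speaker_samples([{'speaker_id': 'a'}], 0, 1): A returns {}, B raises KeyError
import Mathlib
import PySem

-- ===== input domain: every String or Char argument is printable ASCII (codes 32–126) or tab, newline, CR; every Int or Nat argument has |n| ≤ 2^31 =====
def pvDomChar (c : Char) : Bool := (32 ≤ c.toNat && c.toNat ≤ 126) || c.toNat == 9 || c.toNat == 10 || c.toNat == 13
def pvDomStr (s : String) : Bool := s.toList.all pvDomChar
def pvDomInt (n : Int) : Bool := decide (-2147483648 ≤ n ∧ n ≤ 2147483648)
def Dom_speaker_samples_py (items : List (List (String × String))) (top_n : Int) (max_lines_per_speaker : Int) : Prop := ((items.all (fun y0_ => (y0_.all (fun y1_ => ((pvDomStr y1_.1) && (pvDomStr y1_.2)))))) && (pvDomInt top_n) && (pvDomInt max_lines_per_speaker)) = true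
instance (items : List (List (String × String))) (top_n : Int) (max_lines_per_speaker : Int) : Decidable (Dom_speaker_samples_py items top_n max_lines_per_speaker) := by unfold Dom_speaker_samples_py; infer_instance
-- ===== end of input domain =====

-- B replaces A's Counter pass + filtered capped collection pass by one uncapped grouping pass,
-- a stable sort of speakers by group size (mirroring most_common), and capping only at output
-- (objective: alternative decomposition, same asymptotic cost).

-- ===== PORT A =====
-- it["speaker_id"] raises KeyError when absent; Pre_ guarantees presence, so the .getD "" default is never used.
-- Counter(xs).most_common(n) = stable sort of the counter's items by count descending, first n (n ≤ 0 gives []).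
def pvTopSpeakers (items : List (List (String × String))) (top_n : Int) : List String :=
  let cnt : PySem.Dict String Int :=
    PySem.Dict.counter (items.map (fun it => (it.lookup "speaker_id").getD ""))
  ((PySem.List.sorted cnt.items (fun p => p.2) true).take top_n.toNat).map (fun p => p.1)

def speaker_samples_py (items : List (List (String × String))) (top_n : Int) (max_lines_per_speaker : Int) : List (String × String) :=
  let tops : PySem.Set String := PySem.Set.ofList (pvTopSpeakers items top_n)
  let by_spk : PySem.Dict String (List String) := items.foldl (fun d it =>
    let spk := (it.lookup "speaker_id").getD ""
    if PySem.Set.contains tops spk then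
      let d1 := PySem.Dict.setdefault d spk []
      if ((PySem.Dict.getD d1 spk []).length : Int) < max_lines_per_speaker then
        PySem.Dict.modify d1 spk [] (fun l => l ++ [(it.lookup "utterance").getD ""])
      else d1
    else d) PySem.Dict.empty
  by_spk.items.map (fun p => (p.1, PySem.Str.join "\n" p.2))

-- ===== PORT B =====
-- groups.setdefault(k, []).append(v) is Dict.modify k [] (· ++ [v]).
def speaker_samples_py_alt (items : List (List (String × String))) (top_n : Int) (max_lines_per_speaker : Int) : List (String × String) :=
  let groups : PySem.Dict String (List String) := items.foldl
    (fun d it => PySem.Dict.modify d ((it.lookup "speaker_id").getD "") []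
        (fun l => l ++ [(it.lookup "utterance").getD ""])) PySem.Dict.empty
  let top : PySem.Set String := PySem.Set.ofList
    (PySem.List.slice (PySem.List.sorted groups.keys
        (fun s => -((PySem.Dict.getD groups s []).length : Int))) none (some (max top_n 0)))
  (groups.items.filter (fun p => PySem.Set.contains top p.1)).map
    (fun p => (p.1, PySem.Str.join "\n" (PySem.List.slice p.2 none (some (max max_lines_per_speaker 0)))))

-- ===== PRECONDITION & SPEC =====
-- Pre_ excludes items missing the "speaker_id" or "utterance" key: A raises KeyError on a missing
-- "speaker_id" (and on a missing "utterance" of a selected speaker); when only a NON-selected item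
-- lacks "utterance" A still returns, but B's grouping pass naturally raises KeyError there.
def Pre_speaker_samples_py (items : List (List (String × String))) (top_n : Int) (max_lines_per_speaker : Int) : Prop :=
  (items.all (fun it => it.any (fun p => p.1 == "speaker_id") && it.any (fun p => p.1 == "utterance"))) = true
instance (items : List (List (String × String))) (top_n : Int) (max_lines_per_speaker : Int) : Decidable (Pre_speaker_samples_py items top_n max_lines_per_speaker) := by unfold Pre_speaker_samples_py; infer_instance
def pvWitness_speaker_samples_py : (List (List (String × String))) × Int × Int :=
  ([[("speaker_id", "a"), ("utterance", "hi")], [("speaker_id", "b"), ("utterance", "yo")]], 8, 40)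

def Spec_speaker_samples_py (items : List (List (String × String))) (top_n : Int) (max_lines_per_speaker : Int) (out : List (String × String)) : Prop := out = speaker_samples_py_alt items top_n max_lines_per_speaker
instance (items : List (List (String × String))) (top_n : Int) (max_lines_per_speaker : Int) (out : List (String × String)) : Decidable (Spec_speaker_samples_py items top_n max_lines_per_speaker out) := by unfold Spec_speaker_samples_py; infer_instance

-- ===== CLAIM (what is proved, stated in full; the proofs are below) =====
def Claim_equal_speaker_samples_py : Prop := ∀ (items : List (List (String × String))) (top_n : Int) (max_lines_per_speaker : Int), Dom_speaker_samples_py items top_n max_lines_per_speaker → Pre_speaker_samples_py items top_n max_lines_per_speaker → Spec_speaker_samples_py items top_n max_lines_per_speaker (speaker_samples_py items top_n max_lines_per_speaker)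

-- ===== LEMMAS AND PROOFS =====

def pvKey (it : List (String × String)) : String := (it.lookup "speaker_id").getD ""
def pvUtt (it : List (String × String)) : String := (it.lookup "utterance").getD ""
def pvUtts (items : List (List (String × String))) (c : String) : List String :=
  ((items.map (fun it => (pvKey it, pvUtt it))).filter (fun p => p.1 == c)).map (fun p => p.2)
def pvG (items : List (List (String × String))) : PySem.Dict String (List String) :=
  items.foldl (fun d it => PySem.Dict.modify d (pvKey it) [] (fun l => l ++ [pvUtt it])) PySem.Dict.empty

theorem pvG_keys (items : List (List (String × String))) :
    (pvG items).keys = PySem.Set.ofList (items.map pvKey) := by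
  unfold pvG
  rw [PySem.Dict.keys_foldl_modify_key items pvKey [] (fun _ it => fun l => l ++ [pvUtt it])]
  rw [PySem.Dict.keys_empty, PySem.Set.update_nil_left]

theorem pvG_getD (items : List (List (String × String))) (c : String) :
    (pvG items).getD c [] = pvUtts items c := by
  unfold pvG pvUtts
  rw [show (items.foldl (fun d it => PySem.Dict.modify d (pvKey it) [] (fun l => l ++ [pvUtt it])) PySem.Dict.empty)
      = ((items.map (fun it => (pvKey it, pvUtt it))).foldl (fun d p => PySem.Dict.modify d p.1 [] (fun l => l ++ [p.2])) PySem.Dict.empty)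
    from (List.foldl_map (f := fun it => (pvKey it, pvUtt it)) (g := fun d p => PySem.Dict.modify d p.1 [] (fun l => l ++ [p.2]))).symm]
  rw [PySem.Dict.getD_foldl_modify_append, PySem.Dict.getD_empty, List.nil_append]

theorem pvUtts_length (items : List (List (String × String))) (c : String) :
    (pvUtts items c).length = (items.map pvKey).count c := by
  simp [pvUtts, List.count, List.countP_map, ← List.countP_eq_length_filter]
  rfl

def pvStepA (T : PySem.Set String) (m : Int) (d : PySem.Dict String (List String)) (it : List (String × String)) : PySem.Dict String (List String) :=
  if PySem.Set.contains T (pvKey it) then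
    let d1 := PySem.Dict.setdefault d (pvKey it) []
    if ((PySem.Dict.getD d1 (pvKey it) []).length : Int) < m then
      PySem.Dict.modify d1 (pvKey it) [] (fun l => l ++ [pvUtt it])
    else d1
  else d

theorem pvStepA_keys (T : PySem.Set String) (m : Int) (d : PySem.Dict String (List String)) (it : List (String × String)) :
    (pvStepA T m d it).keys = if PySem.Set.contains T (pvKey it) then PySem.Set.add d.keys (pvKey it) else d.keys := by
  unfold pvStepA
  by_cases hT : PySem.Set.contains T (pvKey it) = true
  · rw [if_pos hT, if_pos hT]
    have hc : (PySem.Dict.setdefault d (pvKey it) ([] : List String)).contains (pvKey it) = true := by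
      simp [PySem.Dict.contains_setdefault]
    have hsd : (PySem.Dict.setdefault d (pvKey it) ([] : List String)).keys = PySem.Set.add d.keys (pvKey it) := by
      rw [PySem.Dict.keys_setdefault]
      by_cases hk : d.contains (pvKey it) = true
      · rw [if_pos hk, PySem.Set.add_of_mem ((PySem.Dict.contains_iff_mem_keys d (pvKey it)).mp hk)]
      · rw [if_neg hk, PySem.Set.add_of_not_mem (fun hmem => hk ((PySem.Dict.contains_iff_mem_keys d (pvKey it)).mpr hmem))]
    by_cases hlt : ((PySem.Dict.getD (PySem.Dict.setdefault d (pvKey it) []) (pvKey it) []).length : Int) < m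
    · rw [if_pos hlt, PySem.Dict.keys_modify, PySem.Dict.keys_insert_of_contains _ _ hc, hsd]
    · rw [if_neg hlt, hsd]
  · rw [if_neg hT, if_neg hT]

theorem pvA_keys (T : PySem.Set String) (m : Int) (items : List (List (String × String))) :
    ∀ d : PySem.Dict String (List String),
      (items.foldl (pvStepA T m) d).keys
        = PySem.Set.update d.keys ((items.map pvKey).filter (fun k => PySem.Set.contains T k)) := by
  induction items with
  | nil => intro d; simp [PySem.Set.update_nil]
  | cons it rest ih =>
    intro d
    simp only [List.foldl_cons, List.map_cons, List.filter_cons]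
    by_cases hT : PySem.Set.contains T (pvKey it) = true
    · rw [if_pos hT, ih, PySem.Set.update_cons, pvStepA_keys, if_pos hT]
    · rw [if_neg hT, ih]
      congr 1
      rw [pvStepA_keys, if_neg hT]

theorem pvStepA_getD (T : PySem.Set String) (m : Int) (c : String)
    (d : PySem.Dict String (List String)) (it : List (String × String)) :
    (pvStepA T m d it).getD c []
      = if PySem.Set.contains T (pvKey it) && (pvKey it == c) && decide (((d.getD c []).length : Int) < m)
        then d.getD c [] ++ [pvUtt it] else d.getD c [] := by
  unfold pvStepA
  by_cases hT : PySem.Set.contains T (pvKey it) = true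
  · rw [if_pos hT]
    by_cases hk : pvKey it = c
    · subst hk
      have hsd : (PySem.Dict.setdefault d (pvKey it) ([] : List String)).getD (pvKey it) [] = d.getD (pvKey it) [] :=
        PySem.Dict.getD_setdefault_self d (pvKey it) [] []
      by_cases hlt : ((d.getD (pvKey it) []).length : Int) < m
      · rw [if_pos (by rw [hsd]; exact hlt)]
        simp only [hT, beq_self_eq_true, hlt, decide_true, Bool.and_true, if_true]
        rw [PySem.Dict.getD_modify_self, hsd]
      · rw [if_neg (by rw [hsd]; exact hlt)]
        simp only [hT, beq_self_eq_true, hlt, decide_false, Bool.and_false, Bool.true_and,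
          Bool.false_eq_true, if_false]
        exact hsd
    · have hsd : (PySem.Dict.setdefault d (pvKey it) ([] : List String)).getD c [] = d.getD c [] := by
        simp [PySem.Dict.getD, PySem.Dict.get?_setdefault_of_ne d ([] : List String) (fun h => hk h.symm)]
      have hne : (pvKey it == c) = false := by simp [hk]
      simp only [hne, Bool.and_false, Bool.false_and, Bool.false_eq_true, if_false]
      by_cases hlt : ((PySem.Dict.getD (PySem.Dict.setdefault d (pvKey it) []) (pvKey it) []).length : Int) < m
      · rw [if_pos hlt, PySem.Dict.getD_modify_of_ne _ _ _ (fun h => hk h.symm), hsd]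
      · rw [if_neg hlt, hsd]
  · rw [if_neg hT]
    have hT' : PySem.Set.contains T (pvKey it) = false := by simpa using hT
    rw [hT']
    simp

theorem pvA_getD (T : PySem.Set String) (m : Int) (c : String) (hc : PySem.Set.contains T c = true)
    (items : List (List (String × String))) :
    ∀ d : PySem.Dict String (List String), (d.getD c []).length ≤ m.toNat →
      (items.foldl (pvStepA T m) d).getD c []
        = d.getD c [] ++ (pvUtts items c).take (m.toNat - (d.getD c []).length) := by
  induction items with
  | nil => intro d _; simp [pvUtts]
  | cons it rest ih =>
    intro d hlen
    have hutts : pvUtts (it :: rest) c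
        = if pvKey it == c then pvUtt it :: pvUtts rest c else pvUtts rest c := by
      simp only [pvUtts, List.map_cons, List.filter_cons]
      by_cases h : (pvKey it == c) = true
      · simp [h]
      · simp [h]
    simp only [List.foldl_cons]
    by_cases hk : pvKey it = c
    · subst hk
      rw [hutts]; simp only [beq_self_eq_true, if_true]
      by_cases hlt : ((d.getD (pvKey it) []).length : Int) < m
      · have hstep : (pvStepA T m d it).getD (pvKey it) [] = d.getD (pvKey it) [] ++ [pvUtt it] := by
          rw [pvStepA_getD]
          simp only [hlt, decide_true, Bool.and_true, beq_self_eq_true, hc, if_true]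
        rw [ih _ (by rw [hstep]; simp; omega), hstep, List.append_assoc]
        congr 1
        have h1 : m.toNat - (d.getD (pvKey it) []).length = (m.toNat - (d.getD (pvKey it) []).length - 1) + 1 := by omega
        rw [h1, List.take_succ_cons]
        simp
        omega
      · have hstep : (pvStepA T m d it).getD (pvKey it) [] = d.getD (pvKey it) [] := by
          rw [pvStepA_getD]
          simp [hlt]
        have hge : m.toNat - (d.getD (pvKey it) []).length = 0 := by omega
        rw [ih _ (by rw [hstep]; omega), hstep, hge]
        simp
    · have hne : (pvKey it == c) = false := by simp [hk]
      rw [hutts, hne]; simp only [Bool.false_eq_true, if_false]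
      have hstep : (pvStepA T m d it).getD c [] = d.getD c [] := by
        rw [pvStepA_getD]
        simp [hne]
      rw [ih _ (by rw [hstep]; exact hlen), hstep]

theorem pv_insertBy_map (f : String → String × Int) (x : String) (ys : List String) :
    PySem.List.insertBy (fun a b => decide (b.2 < a.2)) (f x) (ys.map f)
      = (PySem.List.insertBy (fun a b => decide ((f b).2 < (f a).2)) x ys).map f := by
  induction ys with
  | nil => simp [PySem.List.insertBy]
  | cons y ys ih =>
    simp only [List.map_cons, PySem.List.insertBy]
    by_cases h : ((f y).2 < (f x).2)
    · simp [h]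
    · simp [h, ih]

theorem pv_sorted_map (f : String → String × Int) (xs : List String) :
    PySem.List.sorted (xs.map f) (fun p => p.2) true
      = (PySem.List.sorted xs (fun k => (f k).2) true).map f := by
  rw [PySem.List.sorted_rev_eq_foldl_insertBy, PySem.List.sorted_rev_eq_foldl_insertBy,
    List.foldl_map (f := f) (g := fun acc x => PySem.List.insertBy (fun a b => decide (b.2 < a.2)) x acc)]
  have aux : ∀ (l : List String) (acc : List String),
      l.foldl (fun acc x => PySem.List.insertBy (fun a b => decide (b.2 < a.2)) (f x) acc) (acc.map f)
        = (l.foldl (fun acc x => PySem.List.insertBy (fun a b => decide ((f b).2 < (f a).2)) x acc) acc).map f := by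
    intro l
    induction l with
    | nil => intro acc; simp
    | cons x l ih =>
      intro acc
      simp only [List.foldl_cons]
      rw [pv_insertBy_map, ih]
  exact aux xs []

theorem pv_sorted_neg (xs : List String) (g : String → Int) :
    PySem.List.sorted xs (fun s => -(g s)) = PySem.List.sorted xs g true := by
  rw [PySem.List.sorted_eq_foldl_insertBy, PySem.List.sorted_rev_eq_foldl_insertBy]
  congr 1
  funext acc x
  congr 1
  funext a b
  rw [decide_eq_decide]
  omega

theorem pv_add_filter (p : String → Bool) (s : PySem.Set String) (x : String) :
    (PySem.Set.add s x).filter p = if p x then PySem.Set.add (s.filter p) x else s.filter p := by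
  by_cases hm : x ∈ s
  · rw [PySem.Set.add_of_mem hm]
    by_cases hp : p x = true
    · rw [if_pos hp, PySem.Set.add_of_mem (List.mem_filter.mpr ⟨hm, hp⟩)]
    · rw [if_neg hp]
  · rw [PySem.Set.add_of_not_mem hm, List.filter_append]
    by_cases hp : p x = true
    · rw [if_pos hp, PySem.Set.add_of_not_mem (fun h => hm (List.mem_filter.mp h).1)]
      simp [hp]
    · rw [if_neg hp]
      simp [Bool.eq_false_iff.mpr hp]

theorem pv_update_filter (p : String → Bool) (l : List String) :
    ∀ s : PySem.Set String, (PySem.Set.update s l).filter p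
      = PySem.Set.update (s.filter p) (l.filter p) := by
  induction l with
  | nil => intro s; simp [PySem.Set.update_nil]
  | cons x l ih =>
    intro s
    rw [PySem.Set.update_cons, List.filter_cons]
    by_cases hp : p x = true
    · rw [if_pos hp, PySem.Set.update_cons, ih, pv_add_filter, if_pos hp]
    · rw [if_neg hp, ih, pv_add_filter, if_neg hp]

theorem pv_ofList_filter (p : String → Bool) (l : List String) :
    (PySem.Set.ofList l).filter p = PySem.Set.ofList (l.filter p) := by
  rw [← PySem.Set.update_nil_left, pv_update_filter, ← PySem.Set.update_nil_left]
  rfl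

theorem pv_tops_eq (items : List (List (String × String))) (tn : Int) :
    pvTopSpeakers items tn
      = List.take tn.toNat (PySem.List.sorted (PySem.Set.ofList (items.map pvKey))
          (fun k => ((items.map pvKey).count k : Int)) true) := by
  unfold pvTopSpeakers
  show ((PySem.List.sorted (PySem.Dict.counter (items.map pvKey)).items (fun p => p.2) true).take tn.toNat).map (fun p => p.1) = _
  rw [PySem.Dict.items_counter]
  rw [pv_sorted_map (fun k => (k, ((items.map pvKey).count k : Int)))]
  rw [← List.map_take, List.map_map]
  simp [Function.comp_def]

theorem pv_topsB_eq (items : List (List (String × String))) (tn : Int) :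
    PySem.List.slice (PySem.List.sorted (pvG items).keys
        (fun s => -(((pvG items).getD s []).length : Int))) none (some (max tn 0))
      = pvTopSpeakers items tn := by
  rw [PySem.List.slice_to _ (le_max_right tn 0), pv_tops_eq]
  have h1 : (max tn 0).toNat = tn.toNat := by omega
  rw [h1, pvG_keys]
  congr 1
  have h2 : (fun s => -(((pvG items).getD s []).length : Int))
      = fun s => -(((items.map pvKey).count s : Int)) := by
    funext s; rw [pvG_getD, pvUtts_length]
  rw [h2, pv_sorted_neg]

theorem pvA_closed (items : List (List (String × String))) (tn m : Int) :
    speaker_samples_py items tn m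
      = ((PySem.Set.ofList ((items.map pvKey).filter
            (fun k => PySem.Set.contains (PySem.Set.ofList (pvTopSpeakers items tn)) k))).map
          (fun k => (k, PySem.Str.join "\n" ((pvUtts items k).take m.toNat)))) := by
  show (items.foldl (pvStepA (PySem.Set.ofList (pvTopSpeakers items tn)) m) PySem.Dict.empty).items.map
      (fun p => (p.1, PySem.Str.join "\n" p.2)) = _
  set T := PySem.Set.ofList (pvTopSpeakers items tn) with hT_def
  have hkeys : (items.foldl (pvStepA T m) PySem.Dict.empty).keys
      = PySem.Set.ofList ((items.map pvKey).filter (fun k => PySem.Set.contains T k)) := by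
    rw [pvA_keys, PySem.Dict.keys_empty, PySem.Set.update_nil_left]
  rw [PySem.Dict.items_eq_map_keys _ (by rw [hkeys]; exact PySem.Set.nodup_ofList _) []]
  rw [hkeys, List.map_map]
  apply List.map_congr_left
  intro k hk
  have hTk : PySem.Set.contains T k = true :=
    (List.mem_filter.mp ((PySem.Set.mem_ofList _ _).mp hk)).2
  have hgd := pvA_getD T m k hTk items PySem.Dict.empty (by rw [PySem.Dict.getD_empty]; simp)
  rw [PySem.Dict.getD_empty] at hgd
  simp only [List.length_nil, List.nil_append, Nat.sub_zero] at hgd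
  simp [hgd]

theorem pvB_closed (items : List (List (String × String))) (tn m : Int) :
    speaker_samples_py_alt items tn m
      = ((PySem.Set.ofList ((items.map pvKey).filter
            (fun k => PySem.Set.contains (PySem.Set.ofList (pvTopSpeakers items tn)) k))).map
          (fun k => (k, PySem.Str.join "\n" ((pvUtts items k).take m.toNat)))) := by
  show ((pvG items).items.filter (fun p => PySem.Set.contains (PySem.Set.ofList
        (PySem.List.slice (PySem.List.sorted (pvG items).keys
          (fun s => -((PySem.Dict.getD (pvG items) s []).length : Int))) none (some (max tn 0)))) p.1)).map
      (fun p => (p.1, PySem.Str.join "\n" (PySem.List.slice p.2 none (some (max m 0))))) = _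
  rw [pv_topsB_eq]
  rw [PySem.Dict.items_eq_map_keys (pvG items) (by rw [pvG_keys]; exact PySem.Set.nodup_ofList _) []]
  rw [pvG_keys, List.filter_map, List.map_map, pv_ofList_filter]
  have hm : (max m 0).toNat = m.toNat := by omega
  have hcomp : ((fun p => PySem.Set.contains (PySem.Set.ofList (pvTopSpeakers items tn)) p.1)
      ∘ (fun k => (k, (pvG items).getD k []))) = fun k => PySem.Set.contains (PySem.Set.ofList (pvTopSpeakers items tn)) k := rfl
  rw [hcomp]
  apply List.map_congr_left
  intro k hk
  simp [pvG_getD, PySem.List.slice_to _ (le_max_right m 0), hm]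

-- ===== VERDICT (by name: the statement is the Claim_ definition above) =====
theorem speaker_samples_py_spec : Claim_equal_speaker_samples_py := by
  intro items top_n max_lines_per_speaker _ _
  show speaker_samples_py items top_n max_lines_per_speaker
      = speaker_samples_py_alt items top_n max_lines_per_speaker
  rw [pvA_closed, pvB_closed]
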